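-- pv_equiv track=rewrite | github.com/LucasBoelter/Calculadora_Ludica | calculadora.py | mostrar_grupos
-- ===== SOURCE A (Python) =====
-- def mostrar_grupos(inteiro, divisor, icone="🍬", largura_max=60):
--     grupo = "[" + " ".join([icone] * divisor) + "]"
--     grupos = []
--     largura_atual = 0
--     grupos_exibidos = 0
--
--     for _ in range(inteiro):
--         trecho = grupo if grupos_exibidos == 0 else " " + grupo
--
--         if largura_atual + len(trecho) > largura_max:
--             break
--
--         grupos.append(trecho)
--         largura_atual += len(trecho)
--         grupos_exibidos += 1
--
--     resultado = "".join(grupos)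
--
--     if grupos_exibidos < inteiro:
--         restante = inteiro - grupos_exibidos
--         resultado += f" ... (+{restante} grupos)"
--
--     return resultado if resultado else "(nenhum)"
-- ===== SOURCE B (Python) =====
-- def mostrar_grupos(inteiro, divisor, icone="🍬", largura_max=60):
--     grupo = "[" + " ".join([icone] * divisor) + "]"
--     L = len(grupo)
--     k = min(inteiro, (largura_max + 1) // (L + 1))
--     if k < 0:
--         k = 0
--     resultado = " ".join([grupo] * k)
--     if k < inteiro:
--         resultado += f" ... (+{inteiro - k} grupos)"
--     return resultado if resultado else "(nenhum)"
-- ===== Notes on version B (the rewrite author's own statement) =====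
-- stated objective: simpler
-- what changed: The incremental accumulate-and-break width loop is replaced by a closed-form visible-group count k = clamp(min(inteiro, (largura_max+1)//(len(grupo)+1))) and a single ' '.join of k copies of the group.
import Mathlib
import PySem

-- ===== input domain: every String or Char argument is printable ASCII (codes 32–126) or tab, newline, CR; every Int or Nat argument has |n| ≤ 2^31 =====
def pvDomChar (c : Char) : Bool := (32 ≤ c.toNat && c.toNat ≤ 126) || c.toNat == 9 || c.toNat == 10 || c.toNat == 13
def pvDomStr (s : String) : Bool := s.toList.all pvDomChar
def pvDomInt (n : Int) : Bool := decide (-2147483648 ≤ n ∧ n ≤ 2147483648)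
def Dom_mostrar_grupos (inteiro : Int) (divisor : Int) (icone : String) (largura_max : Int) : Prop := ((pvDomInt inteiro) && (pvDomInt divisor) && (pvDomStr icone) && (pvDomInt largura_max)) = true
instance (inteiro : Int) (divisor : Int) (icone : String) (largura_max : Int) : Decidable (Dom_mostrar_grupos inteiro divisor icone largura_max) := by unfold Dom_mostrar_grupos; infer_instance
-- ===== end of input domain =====

-- B replaces A's incremental accumulate-and-break width loop by a closed-form count
-- grupos_exibidos = clamp(min(inteiro, (largura_max+1)//(L+1))) plus one join (objective: simpler).

-- ===== PORT A =====
-- the for-loop of A with its break, as structural recursion on the range length;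
-- state = (grupos, largura_atual, grupos_exibidos)
def pvALoop (grupo : List Char) (largura_max : Int) :
    Nat → List (List Char) × Int × Int → List (List Char) × Int × Int
  | 0, st => st
  | n+1, (grupos, largura_atual, grupos_exibidos) =>
      let trecho := if grupos_exibidos == 0 then grupo else ' ' :: grupo
      if largura_atual + (trecho.length : Int) > largura_max then
        (grupos, largura_atual, grupos_exibidos)
      else
        pvALoop grupo largura_max n
          (grupos ++ [trecho], largura_atual + (trecho.length : Int), grupos_exibidos + 1)

def mostrar_grupos (inteiro : Int) (divisor : Int) (icone : String) (largura_max : Int) : String :=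
  let grupo := '[' :: (PySem.Chars.join [' '] (List.replicate divisor.toNat icone.toList) ++ [']'])
  let st := pvALoop grupo largura_max inteiro.toNat ([], 0, 0)
  let resultado := PySem.Chars.join [] st.1
  let resultado :=
    if st.2.2 < inteiro then
      resultado ++ " ... (+".toList ++ PySem.Int.toChars (inteiro - st.2.2) ++ " grupos)".toList
    else resultado
  if resultado = [] then "(nenhum)" else String.ofList resultado

-- ===== PORT B =====
def mostrar_grupos_alt (inteiro : Int) (divisor : Int) (icone : String) (largura_max : Int) : String :=
  let grupo := '[' :: (PySem.Chars.join [' '] (List.replicate divisor.toNat icone.toList) ++ [']'])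
  let L : Int := grupo.length
  let k0 := min inteiro (PySem.Int.floordiv (largura_max + 1) (L + 1))
  let k := if k0 < 0 then 0 else k0
  let resultado := PySem.Chars.join [' '] (List.replicate k.toNat grupo)
  let resultado :=
    if k < inteiro then
      resultado ++ " ... (+".toList ++ PySem.Int.toChars (inteiro - k) ++ " grupos)".toList
    else resultado
  if resultado = [] then "(nenhum)" else String.ofList resultado

-- ===== PRECONDITION & SPEC =====
def Spec_mostrar_grupos (inteiro : Int) (divisor : Int) (icone : String) (largura_max : Int) (out : String) : Prop := out = mostrar_grupos_alt inteiro divisor icone largura_max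
instance (inteiro : Int) (divisor : Int) (icone : String) (largura_max : Int) (out : String) : Decidable (Spec_mostrar_grupos inteiro divisor icone largura_max out) := by unfold Spec_mostrar_grupos; infer_instance

-- ===== CLAIM (what is proved, stated in full; the proofs are below) =====
def Claim_equal_mostrar_grupos : Prop := ∀ (inteiro : Int) (divisor : Int) (icone : String) (largura_max : Int), Dom_mostrar_grupos inteiro divisor icone largura_max → Spec_mostrar_grupos inteiro divisor icone largura_max (mostrar_grupos inteiro divisor icone largura_max)

-- ===== LEMMAS AND PROOFS =====

-- the list of pieces A's loop has appended after m successful iterations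
def pvGs (g : List Char) : Nat → List (List Char)
  | 0 => []
  | m+1 => pvGs g m ++ [if m == 0 then g else ' ' :: g]

-- A's largura_atual after m successful iterations (L = len grupo)
def pvW (L : Nat) (m : Nat) : Int := if m = 0 then 0 else (m : Int) * ((L : Int) + 1) - 1

-- the closed-form count of groups that fit
def pvK (L : Nat) (W : Int) : Nat := (max 0 (PySem.Int.floordiv (W + 1) ((L : Int) + 1))).toNat

lemma pvW_succ (L m : Nat) :
    pvW L m + (((if m = 0 then L else L + 1) : Nat) : Int) = pvW L (m + 1) := by
  by_cases h : m = 0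
  · subst h; simp [pvW]
  · simp [pvW, h]; ring

lemma pv_step_iff (L : Nat) (W : Int) (m : Nat) :
    pvW L (m + 1) ≤ W ↔ m + 1 ≤ pvK L W := by
  have hb : (0 : Int) < (L : Int) + 1 := by positivity
  have hd := (PySem.Int.le_floordiv_iff_mul_le
    (a := W + 1) (b := (L : Int) + 1) (q := (m : Int) + 1) hb)
  unfold pvW pvK
  simp only [Nat.succ_ne_zero]
  push_cast
  push_cast at hd
  omega

lemma pvALoop_spec (g : List Char) (W : Int) (fuel m : Nat) (hm : m ≤ pvK g.length W) :
    pvALoop g W fuel (pvGs g m, pvW g.length m, (m : Int)) =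
      (pvGs g (min (m + fuel) (pvK g.length W)),
       pvW g.length (min (m + fuel) (pvK g.length W)),
       ((min (m + fuel) (pvK g.length W) : Nat) : Int)) := by
  induction fuel generalizing m with
  | zero => simp [pvALoop, Nat.min_eq_left hm]
  | succ n ih =>
    have hbe : (((m : Int)) == 0) = (decide (m = 0)) := by
      by_cases h : m = 0 <;> simp [h]
    have hlen : (if ((m : Int)) == 0 then g else ' ' :: g).length
        = (if m = 0 then g.length else g.length + 1) := by
      by_cases h : m = 0 <;> simp [hbe, h]
    by_cases hstep : pvW g.length (m + 1) ≤ W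
    · -- the step is taken
      have hm1 : m + 1 ≤ pvK g.length W := (pv_step_iff _ _ _).mp hstep
      have hcond : ¬ (pvW g.length m
          + ((if ((m : Int)) == 0 then g else ' ' :: g).length : Int) > W) := by
        rw [hlen, pvW_succ]
        omega
      have hgs : pvGs g m ++ [if ((m : Int)) == 0 then g else ' ' :: g] = pvGs g (m + 1) := by
        simp [pvGs, hbe]
      have hw : pvW g.length m
          + ((if ((m : Int)) == 0 then g else ' ' :: g).length : Int) = pvW g.length (m + 1) := by
        rw [hlen, pvW_succ]
      show (if _ > W then _ else _) = _
      rw [if_neg hcond, hgs, hw]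
      have : ((m : Int) + 1) = ((m + 1 : Nat) : Int) := by push_cast; ring
      rw [this, ih (m + 1) hm1]
      have harith : m + 1 + n = m + (n + 1) := by omega
      rw [harith]
    · -- break: m = pvK
      have hK : pvK g.length W ≤ m := by
        have := (pv_step_iff g.length W m).not.mp hstep
        omega
      have hmK : m = pvK g.length W := le_antisymm hm hK
      have hcond : pvW g.length m
          + ((if ((m : Int)) == 0 then g else ' ' :: g).length : Int) > W := by
        rw [hlen, pvW_succ]
        omega
      show (if _ > W then _ else _) = _
      rw [if_pos hcond]
      rw [Nat.min_eq_right (by omega)]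
      rw [← hmK]

-- joining A's pieces with "" equals joining m copies of g with " "
lemma pv_join_cons_char (sep : List Char) (c : Char) (p : List Char) (rest : List (List Char)) :
    PySem.Chars.join sep ((c :: p) :: rest) = c :: PySem.Chars.join sep (p :: rest) := by
  cases rest <;> simp [PySem.Chars.join_cons_cons, PySem.Chars.join_singleton]

lemma pv_gs_cons (g : List Char) (m : Nat) :
    pvGs g (m + 1) = g :: List.replicate m (' ' :: g) := by
  induction m with
  | zero => simp [pvGs]
  | succ n ih =>
    show pvGs g (n + 1) ++ [if (n + 1 : Nat) == 0 then g else ' ' :: g]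
      = g :: List.replicate (n + 1) (' ' :: g)
    rw [ih]
    simp [List.replicate_succ']

lemma pv_join_aux (g : List Char) (m : Nat) : ∀ h : List Char,
    PySem.Chars.join [] (h :: List.replicate m (' ' :: g))
      = PySem.Chars.join [' '] (h :: List.replicate m g) := by
  induction m with
  | zero => simp [PySem.Chars.join_singleton]
  | succ n ih =>
    intro h
    rw [List.replicate_succ, List.replicate_succ,
      PySem.Chars.join_cons_cons, PySem.Chars.join_cons_cons, ih (' ' :: g),
      pv_join_cons_char]
    simp

lemma pv_join_eq (g : List Char) (m : Nat) :
    PySem.Chars.join [] (pvGs g m) = PySem.Chars.join [' '] (List.replicate m g) := by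
  cases m with
  | zero => simp [pvGs, PySem.Chars.join_nil]
  | succ n => rw [pv_gs_cons, List.replicate_succ, pv_join_aux]

-- ===== VERDICT (by name: the statement is the Claim_ definition above) =====
theorem mostrar_grupos_spec : Claim_equal_mostrar_grupos := by
  intro inteiro divisor icone largura_max _
  unfold Spec_mostrar_grupos mostrar_grupos mostrar_grupos_alt
  dsimp only
  set g := '[' :: (PySem.Chars.join [' '] (List.replicate divisor.toNat icone.toList) ++ [']'])
    with hg
  set r := min inteiro.toNat (pvK g.length largura_max) with hr
  have e1 : pvALoop g largura_max inteiro.toNat ([], 0, 0)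
      = (pvGs g r, pvW g.length r, (r : Int)) := by
    have h := pvALoop_spec g largura_max inteiro.toNat 0 (Nat.zero_le _)
    simp only [Nat.zero_add] at h
    rw [hr]
    exact h
  rw [e1]
  have e2 : (if min inteiro (PySem.Int.floordiv (largura_max + 1) ((g.length : Int) + 1)) < 0
        then (0 : Int)
        else min inteiro (PySem.Int.floordiv (largura_max + 1) ((g.length : Int) + 1)))
      = (r : Int) := by
    rw [hr]; unfold pvK; omega
  rw [e2]
  simp only [Int.toNat_natCast, pv_join_eq]
-- delete templates: done
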